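-- pv_equiv track=rewrite | github.com/briannaosms/parking-occupancy-detection-system | object-detection/src/app.py | count_centroids
-- ===== SOURCE A (Python) =====
-- def count_centroids(centroids):
--     plotted_centroids = []
--     # Defined ranges for detecting student parking spots
--     student_first_range = [[235, 0], [400, 25]]
--     student_second_range = [[0, 75], [575, 105]]
--     # student_second_range = [[0, 75], [605, 175]]
--     student_third_range = [[0, 140], [605, 165]]
--     # Defined ranges for detecting faculty parking spots
--     faculty_range = [[0, 375], [720, 450]]
--     # Defined ranges for detecting handicapped parking spots
--     handicapped_range = [[45, 25], [130, 50]]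
--     # Defined ranges for detecting visitor parking spots
--     visitor_range = [[0, 0], [0, 0]]
--
--     student_spaces = faculty_spaces = handicapped_spaces = visitor_spaces = other_objects = 0
--
--     # Loop to check each centroid in the list
--     for i in range(len(centroids)):
--         # Check the handicapped section
--         if(handicapped_range[0][0] <= centroids[i][0] <= handicapped_range[1][0] and
--            handicapped_range[0][1] <= centroids[i][1] <= handicapped_range[1][1]):
--             handicapped_spaces += 1
--             plotted_centroids.append(centroids[i])
--         # Check the faculty section
--         elif(faculty_range[0][0] <= centroids[i][0] <= faculty_range[1][0] and
--              faculty_range[0][1] <= centroids[i][1] <= faculty_range[1][1]):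
--             faculty_spaces += 1
--             plotted_centroids.append(centroids[i])
--         # Check the first student section
--         elif(student_first_range[0][0] <= centroids[i][0] <= student_first_range[1][0] and
--              student_first_range[0][1] <= centroids[i][1] <= student_first_range[1][1]):
--             student_spaces += 1
--             plotted_centroids.append(centroids[i])
--         # Check the second student section
--         elif(student_second_range[0][0] <= centroids[i][0] <= student_second_range[1][0] and
--              student_second_range[0][1] <= centroids[i][1] <= student_second_range[1][1]):
--             student_spaces += 1
--             plotted_centroids.append(centroids[i])
--         # Check the third student section
--         elif(student_third_range[0][0] <= centroids[i][0] <= student_third_range[1][0] and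
--             student_third_range[0][1] <= centroids[i][1] <= student_third_range[1][1]):
--             student_spaces += 1
--             plotted_centroids.append(centroids[i])
--         # Check the vistor section
--         elif(visitor_range[0][0] <= centroids[i][0] <= visitor_range[1][0] and
--              visitor_range[0][1] <= centroids[i][1] <= visitor_range[1][1]):
--             visitor_spaces += 1
--             plotted_centroids.append(centroids[i])
--         else:
--             other_objects += 1
--
--     return plotted_centroids, faculty_spaces, student_spaces, handicapped_spaces, visitor_spaces
-- ===== SOURCE B (Python) =====
-- def count_centroids(centroids):
--     # Staged-pass formulation: each category's count is an independent filtered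
--     # count over disjoint predicate compositions (in-this-box AND not in any
--     # earlier-priority box); the plotted list is one more filter pass.
--     def inside(c, x0, y0, x1, y1):
--         return x0 <= c[0] <= x1 and y0 <= c[1] <= y1
--
--     def H(c):
--         return inside(c, 45, 25, 130, 50)
--
--     def F(c):
--         return inside(c, 0, 375, 720, 450)
--
--     def S(c):
--         return (inside(c, 235, 0, 400, 25) or inside(c, 0, 75, 575, 105)
--                 or inside(c, 0, 140, 605, 165))
--
--     def V(c):
--         return inside(c, 0, 0, 0, 0)
--
--     handicapped = sum(1 for c in centroids if H(c))
--     faculty = sum(1 for c in centroids if F(c) and not H(c))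
--     student = sum(1 for c in centroids if S(c) and not H(c) and not F(c))
--     visitor = sum(1 for c in centroids if V(c) and not (H(c) or F(c) or S(c)))
--     plotted = [c for c in centroids if H(c) or F(c) or S(c) or V(c)]
--     return plotted, faculty, student, handicapped, visitor
-- ===== Notes on version B (the rewrite author's own statement) =====
-- stated objective: alternative
-- what changed: Replaces A's single pass with a first-match elif chain over five mutable counters by five independent staged passes: each category count is a filtered count over a disjoint predicate composition (in this box AND not in any higher-priority box), and the plotted list is a separate filter pass; correct because classification of a centroid is pure and per-element, so the counts can be computed independently.
import Mathlib
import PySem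

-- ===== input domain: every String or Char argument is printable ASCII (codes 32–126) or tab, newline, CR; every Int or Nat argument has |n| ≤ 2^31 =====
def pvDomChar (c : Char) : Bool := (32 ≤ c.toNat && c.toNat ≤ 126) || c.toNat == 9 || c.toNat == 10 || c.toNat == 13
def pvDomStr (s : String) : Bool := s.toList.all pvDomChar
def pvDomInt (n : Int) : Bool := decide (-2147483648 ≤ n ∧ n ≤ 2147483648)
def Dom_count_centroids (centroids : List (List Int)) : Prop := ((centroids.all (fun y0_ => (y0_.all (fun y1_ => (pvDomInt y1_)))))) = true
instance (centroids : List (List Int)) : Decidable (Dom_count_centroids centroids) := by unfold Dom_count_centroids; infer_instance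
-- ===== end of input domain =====

-- B replaces A's single first-match elif-chain pass over five mutable counters by
-- independent staged passes: each category count is a filtered count over a
-- disjoint predicate composition, and the plotted list is one more filter pass
-- (objective: alternative; A's never-returned other_objects counter is dropped).

-- ===== PORT A =====
-- One iteration of A's for-loop plus the recursion over the list; state is
-- (plotted, faculty, student, handicapped, visitor, other).  c[0]/c[1] are read
-- with pyGetD: Pre_ guarantees that whenever A's Python would read them they exist,
-- so the default is never used on admitted inputs.
def countA_go : List (List Int) → List (List Int) × Int × Int × Int × Int × Int → List (List Int) × Int × Int × Int × Int × Int
  | [], acc => acc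
  | c :: rest, (p, f, s, h, v, o) =>
    let x := PySem.List.pyGetD c 0 0
    let y := PySem.List.pyGetD c 1 0
    countA_go rest <|
      if 45 ≤ x ∧ x ≤ 130 ∧ 25 ≤ y ∧ y ≤ 50 then (p ++ [c], f, s, h + 1, v, o)
      else if 0 ≤ x ∧ x ≤ 720 ∧ 375 ≤ y ∧ y ≤ 450 then (p ++ [c], f + 1, s, h, v, o)
      else if 235 ≤ x ∧ x ≤ 400 ∧ 0 ≤ y ∧ y ≤ 25 then (p ++ [c], f, s + 1, h, v, o)
      else if 0 ≤ x ∧ x ≤ 575 ∧ 75 ≤ y ∧ y ≤ 105 then (p ++ [c], f, s + 1, h, v, o)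
      else if 0 ≤ x ∧ x ≤ 605 ∧ 140 ≤ y ∧ y ≤ 165 then (p ++ [c], f, s + 1, h, v, o)
      else if 0 ≤ x ∧ x ≤ 0 ∧ 0 ≤ y ∧ y ≤ 0 then (p ++ [c], f, s, h, v + 1, o)
      else (p, f, s, h, v, o + 1)

def count_centroids (centroids : List (List Int)) : List (List Int) × Int × Int × Int × Int :=
  let r := countA_go centroids ([], 0, 0, 0, 0, 0)
  (r.1, r.2.1, r.2.2.1, r.2.2.2.1, r.2.2.2.2.1)

-- ===== PORT B =====
-- B's helper predicates (inside / H / F / S / V from Source B).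
def pvInside (c : List Int) (x0 y0 x1 y1 : Int) : Bool :=
  let x := PySem.List.pyGetD c 0 0
  let y := PySem.List.pyGetD c 1 0
  decide (x0 ≤ x ∧ x ≤ x1 ∧ y0 ≤ y ∧ y ≤ y1)

def pvH (c : List Int) : Bool := pvInside c 45 25 130 50
def pvF (c : List Int) : Bool := pvInside c 0 375 720 450
def pvS (c : List Int) : Bool :=
  pvInside c 235 0 400 25 || pvInside c 0 75 575 105 || pvInside c 0 140 605 165
def pvV (c : List Int) : Bool := pvInside c 0 0 0 0

def count_centroids_alt (centroids : List (List Int)) : List (List Int) × Int × Int × Int × Int :=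
  let handicapped : Int := centroids.countP pvH
  let faculty : Int := centroids.countP (fun c => pvF c && !pvH c)
  let student : Int := centroids.countP (fun c => pvS c && !pvH c && !pvF c)
  let visitor : Int := centroids.countP (fun c => pvV c && !(pvH c || pvF c || pvS c))
  let plotted := centroids.filter (fun c => pvH c || pvF c || pvS c || pvV c)
  (plotted, faculty, student, handicapped, visitor)

-- ===== PRECONDITION & SPEC =====
-- Pre_ excludes exactly the inputs on which Python (A and B alike) raises
-- IndexError: an empty centroid, or a single-element centroid [x] with
-- 0 ≤ x ≤ 720 (its x matches some rectangle's x-range, so the missing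
-- y-coordinate is read).
def Pre_count_centroids (centroids : List (List Int)) : Prop :=
  ∀ c ∈ centroids, 2 ≤ c.length ∨
    (c.length = 1 ∧ (PySem.List.pyGetD c 0 0 < 0 ∨ 720 < PySem.List.pyGetD c 0 0))
instance (centroids : List (List Int)) : Decidable (Pre_count_centroids centroids) := by unfold Pre_count_centroids; infer_instance

def pvWitness_count_centroids : List (List Int) := [[50, 30], [100, 400], [300, 10], [9, 9], [0, 0]]

def Spec_count_centroids (centroids : List (List Int)) (out : List (List Int) × Int × Int × Int × Int) : Prop := out = count_centroids_alt centroids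
instance (centroids : List (List Int)) (out : List (List Int) × Int × Int × Int × Int) : Decidable (Spec_count_centroids centroids out) := by unfold Spec_count_centroids; infer_instance

-- ===== CLAIM (what is proved, stated in full; the proofs are below) =====
def Claim_equal_count_centroids : Prop := ∀ (centroids : List (List Int)), Dom_count_centroids centroids → Pre_count_centroids centroids → Spec_count_centroids centroids (count_centroids centroids)

-- ===== LEMMAS AND PROOFS =====

-- Invariant: A's fold with an arbitrary accumulator equals the accumulator plus
-- B's staged counts/filter of the remaining list.
theorem pv_go_eq (cs : List (List Int)) :
    ∀ p f s h v o : _,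
    countA_go cs (p, f, s, h, v, o) =
      (p ++ cs.filter (fun c => pvH c || pvF c || pvS c || pvV c),
       f + (cs.countP (fun c => pvF c && !pvH c) : Int),
       s + (cs.countP (fun c => pvS c && !pvH c && !pvF c) : Int),
       h + (cs.countP pvH : Int),
       v + (cs.countP (fun c => pvV c && !(pvH c || pvF c || pvS c)) : Int),
       o + (cs.countP (fun c => !(pvH c || pvF c || pvS c || pvV c)) : Int)) := by
  induction cs with
  | nil => intro p f s h v o; simp [countA_go]
  | cons c rest ih =>
    intro p f s h v o
    simp only [countA_go]
    split_ifs with h1 h2 h3 h4 h5 h6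
    · have eH : pvH c = true := by simp only [pvH, pvInside]; exact decide_eq_true h1
      rw [ih]; simp [eH, Prod.ext_iff]
      all_goals omega
    · have eH : pvH c = false := by simp only [pvH, pvInside]; exact decide_eq_false h1
      have eF : pvF c = true := by simp only [pvF, pvInside]; exact decide_eq_true h2
      rw [ih]; simp [eH, eF, Prod.ext_iff]
      all_goals omega
    · have eH : pvH c = false := by simp only [pvH, pvInside]; exact decide_eq_false h1
      have eF : pvF c = false := by simp only [pvF, pvInside]; exact decide_eq_false h2
      have eS1 : pvInside c 235 0 400 25 = true := by simp only [pvInside]; exact decide_eq_true h3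
      rw [ih]; simp [eH, eF, pvS, eS1, Prod.ext_iff]
      all_goals omega
    · have eH : pvH c = false := by simp only [pvH, pvInside]; exact decide_eq_false h1
      have eF : pvF c = false := by simp only [pvF, pvInside]; exact decide_eq_false h2
      have eS2 : pvInside c 0 75 575 105 = true := by simp only [pvInside]; exact decide_eq_true h4
      rw [ih]; simp [eH, eF, pvS, eS2, Prod.ext_iff]
      all_goals omega
    · have eH : pvH c = false := by simp only [pvH, pvInside]; exact decide_eq_false h1
      have eF : pvF c = false := by simp only [pvF, pvInside]; exact decide_eq_false h2
      have eS3 : pvInside c 0 140 605 165 = true := by simp only [pvInside]; exact decide_eq_true h5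
      rw [ih]; simp [eH, eF, pvS, eS3, Prod.ext_iff]
      all_goals omega
    · have eH : pvH c = false := by simp only [pvH, pvInside]; exact decide_eq_false h1
      have eF : pvF c = false := by simp only [pvF, pvInside]; exact decide_eq_false h2
      have eS1 : pvInside c 235 0 400 25 = false := by simp only [pvInside]; exact decide_eq_false h3
      have eS2 : pvInside c 0 75 575 105 = false := by simp only [pvInside]; exact decide_eq_false h4
      have eS3 : pvInside c 0 140 605 165 = false := by simp only [pvInside]; exact decide_eq_false h5
      have eV : pvV c = true := by simp only [pvV, pvInside]; exact decide_eq_true h6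
      rw [ih]; simp [eH, eF, pvS, eS1, eS2, eS3, eV, Prod.ext_iff]
      all_goals omega
    · have eH : pvH c = false := by simp only [pvH, pvInside]; exact decide_eq_false h1
      have eF : pvF c = false := by simp only [pvF, pvInside]; exact decide_eq_false h2
      have eS1 : pvInside c 235 0 400 25 = false := by simp only [pvInside]; exact decide_eq_false h3
      have eS2 : pvInside c 0 75 575 105 = false := by simp only [pvInside]; exact decide_eq_false h4
      have eS3 : pvInside c 0 140 605 165 = false := by simp only [pvInside]; exact decide_eq_false h5
      have eV : pvV c = false := by simp only [pvV, pvInside]; exact decide_eq_false h6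
      rw [ih]; simp [eH, eF, pvS, eS1, eS2, eS3, eV, Prod.ext_iff]
      all_goals omega

-- ===== VERDICT (by name: the statement is the Claim_ definition above) =====
theorem count_centroids_spec : Claim_equal_count_centroids := by
  intro centroids _ _
  show count_centroids centroids = count_centroids_alt centroids
  simp only [count_centroids, count_centroids_alt]
  rw [pv_go_eq]
  simp
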